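-- pv_equiv track=rewrite | github.com/Demeuldre/nonabot | src/nongram_solver/nonogramgenerator.py | _count_rows
-- ===== SOURCE A (Python) =====
-- def _count_rows(ar):
-- 	res = []
-- 	for row in ar:
-- 		row_res = []
-- 		cnt = 0
-- 		for v in row:
-- 			if v == True:
-- 				cnt += 1
-- 			elif cnt != 0:
-- 				row_res.append(cnt)
-- 				cnt = 0
-- 		if cnt != 0:
-- 			row_res.append(cnt)
-- 		res.append(row_res)
-- 	return res
-- ===== SOURCE B (Python) =====
-- def _count_rows(ar):
--     def runs(row):
--         n = len(row)
--         starts = [i for i in range(n) if row[i] and (i == 0 or not row[i - 1])]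
--         ends = [i for i in range(n) if row[i] and (i == n - 1 or not row[i + 1])]
--         return [e - s + 1 for s, e in zip(starts, ends)]
--     return [runs(row) for row in ar]
-- ===== Notes on version B (the rewrite author's own statement) =====
-- stated objective: alternative
-- what changed: Instead of a running counter flushed at run boundaries, B computes per row the index lists of run starts and run ends by boundary tests (row[i] true with false/absent neighbour) and zips them, each run length being end - start + 1.
import Mathlib
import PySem

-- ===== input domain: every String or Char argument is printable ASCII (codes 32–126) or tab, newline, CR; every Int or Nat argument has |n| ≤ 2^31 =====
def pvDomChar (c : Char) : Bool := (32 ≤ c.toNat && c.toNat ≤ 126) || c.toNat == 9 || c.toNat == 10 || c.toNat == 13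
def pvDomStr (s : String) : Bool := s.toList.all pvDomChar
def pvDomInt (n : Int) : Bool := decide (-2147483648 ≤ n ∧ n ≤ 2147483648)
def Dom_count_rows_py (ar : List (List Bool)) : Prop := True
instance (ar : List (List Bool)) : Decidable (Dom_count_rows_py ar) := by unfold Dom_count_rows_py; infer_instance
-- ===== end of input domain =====

-- B replaces A's running counter with a boundary-index computation: zip the lists of run-start and run-end indices and take end - start + 1; alternative decomposition, same cost.


-- ===== PORT A =====
-- inner loop of A over one row, carrying (row_res, cnt); trailing run flushed at the end
def countRowsLoopA : List Bool → List Int → Int → List Int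
  | [], row_res, cnt => if cnt ≠ 0 then row_res ++ [cnt] else row_res
  | v :: rest, row_res, cnt =>
      if v == true then countRowsLoopA rest row_res (cnt + 1)
      else if cnt ≠ 0 then countRowsLoopA rest (row_res ++ [cnt]) 0
      else countRowsLoopA rest row_res cnt

def count_rows_py (ar : List (List Bool)) : List (List Int) :=
  ar.foldl (fun res row => res ++ [countRowsLoopA row [] 0]) []

-- ===== PORT B =====
-- indices i with row[i] true and (i = 0 or row[i-1] false): run starts
def pvStarts (row : List Bool) : List Nat :=
  (List.range row.length).filter
    (fun i => row.getD i false && (decide (i = 0) || !(row.getD (i - 1) false)))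

-- indices i with row[i] true and (i = n-1 or row[i+1] false): run ends
def pvEnds (row : List Bool) : List Nat :=
  (List.range row.length).filter
    (fun i => row.getD i false && (decide (i = row.length - 1) || !(row.getD (i + 1) false)))

def pvRunsB (row : List Bool) : List Int :=
  ((pvStarts row).zip (pvEnds row)).map (fun p => (p.2 : Int) - (p.1 : Int) + 1)

def count_rows_py_alt (ar : List (List Bool)) : List (List Int) :=
  ar.map pvRunsB

-- ===== PRECONDITION & SPEC =====
def Spec_count_rows_py (ar : List (List Bool)) (out : List (List Int)) : Prop := out = count_rows_py_alt ar
instance (ar : List (List Bool)) (out : List (List Int)) : Decidable (Spec_count_rows_py ar out) := by unfold Spec_count_rows_py; infer_instance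

-- ===== CLAIM (what is proved, stated in full; the proofs are below) =====
def Claim_equal_count_rows_py : Prop := ∀ (ar : List (List Bool)), Dom_count_rows_py ar → Spec_count_rows_py ar (count_rows_py ar)

-- ===== LEMMAS AND PROOFS =====

-- proof-side version of pvStarts generalized over the previous element
def gS (prev : Bool) (l : List Bool) : List Nat :=
  (List.range l.length).filter (fun i => l.getD i false && !((prev :: l).getD i false))

-- proof-side version of pvEnds (out-of-range successor defaults to false)
def gE (l : List Bool) : List Nat :=
  (List.range l.length).filter (fun i => l.getD i false && !(l.getD (i + 1) false))

theorem pvStarts_eq_gS (l : List Bool) : pvStarts l = gS false l := by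
  unfold pvStarts gS
  refine List.filter_congr ?_
  intro i _
  cases i <;> simp

theorem pvEnds_eq_gE (l : List Bool) : pvEnds l = gE l := by
  unfold pvEnds gE
  refine List.filter_congr ?_
  intro i hi
  rw [List.mem_range] at hi
  by_cases h : i = l.length - 1
  · subst h
    have h1 : l.length - 1 + 1 = l.length := by omega
    simp only [List.getD]
    rw [h1, List.getElem?_eq_none (le_refl l.length)]
    simp
  · simp [h]

theorem gS_cons (prev v : Bool) (rest : List Bool) :
    gS prev (v :: rest) = (if v && !prev then [0] else []) ++ (gS v rest).map (· + 1) := by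
  unfold gS
  rw [List.length_cons, List.range_succ_eq_map]
  simp only [List.filter_cons, List.getD_cons_zero]
  rw [List.filter_map]
  split <;> simp_all [Function.comp_def]

theorem gE_cons (v : Bool) (rest : List Bool) :
    gE (v :: rest) = (if v && !(rest.getD 0 false) then [0] else []) ++ (gE rest).map (· + 1) := by
  unfold gE
  rw [List.length_cons, List.range_succ_eq_map]
  simp only [List.filter_cons, List.getD_cons_zero]
  rw [List.filter_map]
  split <;> simp_all [Function.comp_def]

theorem gS_head_false {rest : List Bool} (h : rest.getD 0 false = false) :
    gS true rest = gS false rest := by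
  unfold gS
  refine List.filter_congr ?_
  intro i _
  cases i with
  | zero =>
      simp only [List.getD] at h
      simp [List.getD, h]
  | succ j => simp

theorem gS_run {rest : List Bool} (h : rest.getD 0 false = false) (k : Nat) :
    gS true (List.replicate k true ++ rest) = (gS false rest).map (· + k) := by
  induction k with
  | zero => simpa using gS_head_false h
  | succ n ih =>
      rw [List.replicate_succ, List.cons_append, gS_cons]
      simp only [Bool.not_true, Bool.and_false, if_neg (by simp : ¬ (false = true)), List.nil_append]
      rw [ih, List.map_map]
      refine List.map_congr_left ?_
      intro a _; simp [Function.comp]; omega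

theorem gS_run_top {rest : List Bool} (h : rest.getD 0 false = false) (k : Nat) :
    gS false (List.replicate (k + 1) true ++ rest) = 0 :: (gS false rest).map (· + (k + 1)) := by
  rw [List.replicate_succ, List.cons_append, gS_cons, gS_run h]
  simp only [Bool.not_false, Bool.and_self, if_true, List.map_map, List.singleton_append,
    List.cons.injEq, true_and]
  refine List.map_congr_left ?_
  intro a _; simp [Function.comp]; omega

theorem gE_run {rest : List Bool} (h : rest.getD 0 false = false) (k : Nat) :
    gE (List.replicate (k + 1) true ++ rest) = k :: (gE rest).map (· + (k + 1)) := by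
  induction k with
  | zero =>
      simp only [List.replicate_succ, List.replicate_zero, List.nil_append, List.cons_append]
      rw [gE_cons, h]
      simp
  | succ n ih =>
      rw [List.replicate_succ, List.cons_append, gE_cons]
      have hhd : (List.replicate (n + 1) true ++ rest).getD 0 false = true := by
        simp [List.replicate_succ]
      rw [hhd]
      simp only [Bool.not_true, Bool.and_false, if_neg (by simp : ¬ (false = true)), List.nil_append]
      rw [ih, List.map_cons, List.map_map]
      congr 1

-- pvRunsB in terms of gS/gE
theorem pvRunsB_eq (l : List Bool) :
    pvRunsB l = ((gS false l).zip (gE l)).map (fun p => (p.2 : Int) - (p.1 : Int) + 1) := by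
  rw [pvRunsB, pvStarts_eq_gS, pvEnds_eq_gE]

theorem zip_map_shift (a b : List Nat) (k : Nat) :
    ((a.map (· + k)).zip (b.map (· + k))).map (fun p : Nat × Nat => (p.2 : Int) - (p.1 : Int) + 1)
      = (a.zip b).map (fun p : Nat × Nat => (p.2 : Int) - (p.1 : Int) + 1) := by
  rw [List.zip_map, List.map_map]
  refine List.map_congr_left ?_
  intro p _
  simp [Function.comp, Prod.map]

theorem pvRunsB_nil : pvRunsB [] = [] := by
  simp [pvRunsB, pvStarts, pvEnds]

theorem pvRunsB_false_cons (rest : List Bool) : pvRunsB (false :: rest) = pvRunsB rest := by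
  rw [pvRunsB_eq, pvRunsB_eq]
  have hs : gS false (false :: rest) = (gS false rest).map (· + 1) := by
    rw [gS_cons]; simp
  have he : gE (false :: rest) = (gE rest).map (· + 1) := by
    rw [gE_cons]; simp
  rw [hs, he, zip_map_shift]

theorem pvRunsB_run {rest : List Bool} (h : rest.getD 0 false = false) (k : Nat) :
    pvRunsB (List.replicate (k + 1) true ++ rest) = ((k : Int) + 1) :: pvRunsB rest := by
  rw [pvRunsB_eq, pvRunsB_eq, gS_run_top h, gE_run h, List.zip_cons_cons, List.map_cons,
    zip_map_shift]
  simp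

theorem loopA_eq (l : List Bool) : ∀ (acc : List Int) (k : Nat),
    countRowsLoopA l acc (k : Int) = acc ++ pvRunsB (List.replicate k true ++ l) := by
  induction l with
  | nil =>
      intro acc k
      cases k with
      | zero => simp [countRowsLoopA, pvRunsB_nil]
      | succ n =>
          simp only [countRowsLoopA, List.append_nil]
          rw [if_pos (by exact_mod_cast Nat.succ_ne_zero n)]
          rw [show List.replicate (n + 1) true = List.replicate (n + 1) true ++ ([] : List Bool)
            from (List.append_nil _).symm]
          rw [pvRunsB_run (by simp) n, pvRunsB_nil]
          push_cast; rfl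
  | cons v rest ih =>
      intro acc k
      cases v with
      | true =>
          simp only [countRowsLoopA, BEq.rfl, if_true]
          have : (k : Int) + 1 = ((k + 1 : Nat) : Int) := by push_cast; ring
          rw [this, ih acc (k + 1)]
          congr 1
          rw [List.replicate_succ']
          simp
      | false =>
          cases k with
          | zero =>
              simpa [countRowsLoopA, pvRunsB_false_cons] using ih acc 0
          | succ n =>
              simp only [countRowsLoopA]
              rw [if_neg (by simp), if_pos (by exact_mod_cast Nat.succ_ne_zero n)]
              have hr : pvRunsB (List.replicate (n + 1) true ++ false :: rest)
                  = ((n : Int) + 1) :: pvRunsB rest := by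
                rw [pvRunsB_run (by simp) n, pvRunsB_false_cons]
              have h0 := ih (acc ++ [((n : Int) + 1)]) 0
              simp only [List.replicate_zero, List.nil_append, Nat.cast_zero] at h0
              push_cast
              rw [h0, hr]
              simp [List.append_assoc]

theorem foldl_rows (ar : List (List Bool)) : ∀ (acc : List (List Int)),
    ar.foldl (fun res row => res ++ [countRowsLoopA row [] 0]) acc = acc ++ ar.map pvRunsB := by
  induction ar with
  | nil => simp
  | cons row rest ih =>
      intro acc
      have h := loopA_eq row [] 0
      simp only [List.replicate_zero, List.nil_append, Nat.cast_zero] at h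
      simp [List.foldl_cons, ih, h, List.append_assoc]

-- ===== VERDICT (by name: the statement is the Claim_ definition above) =====
theorem count_rows_py_spec : Claim_equal_count_rows_py := by
  intro ar _
  unfold Spec_count_rows_py count_rows_py count_rows_py_alt
  simpa using foldl_rows ar []
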